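-- pv_equiv track=rewrite | github.com/shaystevens/COSC343-Wordle-AI | cosc343_wordle/my_agent_copy.py | bestWord
-- ===== SOURCE A (Python) =====
-- import operator
--
-- def bestWord(dictionary, word_length):
--    frequency_dictionary = {}
--    for word in dictionary:
--       for letter in word:
--          frequency_dictionary = letterDictionary(frequency_dictionary, letter)
--
--    best_letters = list(dict(sorted(frequency_dictionary.items(), key=operator.itemgetter(1), reverse=True)[:word_length]).keys())
--    word_score = {}
--
--    for word in dictionary:
--       score = 0
--       for i in range(0, len(best_letters)):
--          if best_letters[i] in word:
--             score += word_length - i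
--
--       word_score.update({word: score})
--
--    best_word = list(dict(sorted(word_score.items(), key=operator.itemgetter(1), reverse=True)[:1]).keys())[0]
--
--    return best_word
--
-- def letterDictionary(letter_dictionary, letter):
--    count = 1
--    if letter_dictionary.get(letter) != None:
--       count = letter_dictionary.get(letter) + 1
--       letter_dictionary.update({letter: count})
--    else:
--       letter_dictionary.update({letter: count})
--
--    return letter_dictionary
-- ===== SOURCE B (Python) =====
-- def bestWord(dictionary, word_length):
--     freq = {}
--     for word in dictionary:
--         for ch in word:
--             freq[ch] = freq.get(ch, 0) + 1
--     ranked = [kv[0] for kv in sorted(freq.items(), key=lambda kv: kv[1], reverse=True)[:word_length]]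
--     weight = {ch: word_length - i for i, ch in enumerate(ranked)}
--     word_score = {word: sum(weight.get(ch, 0) for ch in set(word)) for word in dictionary}
--     return sorted(word_score.items(), key=lambda kv: kv[1], reverse=True)[0][0]
-- ===== Notes on version B (the rewrite author's own statement) =====
-- stated objective: alternative
-- what changed: The scoring pass is inverted: instead of testing each of the word_length ranked letters for substring membership in every word, B builds a letter-to-positional-weight dict once and scores each word by summing table lookups over its distinct characters, reading the winner directly off the sorted score list.
import Mathlib
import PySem

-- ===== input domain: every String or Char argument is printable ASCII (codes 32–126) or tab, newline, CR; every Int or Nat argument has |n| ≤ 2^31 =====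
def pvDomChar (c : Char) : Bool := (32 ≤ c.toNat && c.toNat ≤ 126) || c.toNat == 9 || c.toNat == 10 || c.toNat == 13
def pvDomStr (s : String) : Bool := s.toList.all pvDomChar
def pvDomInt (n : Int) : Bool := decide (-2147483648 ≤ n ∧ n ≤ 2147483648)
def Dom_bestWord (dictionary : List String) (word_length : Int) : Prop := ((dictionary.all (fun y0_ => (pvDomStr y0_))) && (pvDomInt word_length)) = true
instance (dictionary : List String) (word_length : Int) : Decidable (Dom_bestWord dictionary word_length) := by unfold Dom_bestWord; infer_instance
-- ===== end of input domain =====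

-- B replaces A's per-word scan over the ranked letters (substring test each) by a letter→positional-weight
-- table summed over each word's distinct characters, and reads the winner off the sorted score list directly.


-- ===== PORT A =====
def letterDictionary (letter_dictionary : PySem.Dict Char Int) (letter : Char) : PySem.Dict Char Int :=
  match letter_dictionary.get? letter with
  | some c => letter_dictionary.insert letter (c + 1)
  | none   => letter_dictionary.insert letter 1

def bestWord (dictionary : List String) (word_length : Int) : String :=
  let frequency_dictionary : PySem.Dict Char Int :=
    dictionary.foldl (fun fd word => word.toList.foldl letterDictionary fd) PySem.Dict.empty
  let best_letters : List Char :=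
    (PySem.Dict.ofList (PySem.List.slice
        (PySem.List.sorted frequency_dictionary.items (fun kv => kv.2) true)
        none (some word_length))).keys
  let word_score : PySem.Dict String Int :=
    dictionary.foldl (fun ws word =>
      let score : Int :=
        (PySem.List.pyRange 0 (best_letters.length : Int) 1).foldl (fun s i =>
          if PySem.Chars.isIn [PySem.List.pyGetD best_letters i ' '] word.toList then
            s + (word_length - i) else s) 0
      ws.insert word score) PySem.Dict.empty
  -- `list(dict(sorted(...)[:1]).keys())[0]`: the default "" stands where Python raises IndexError
  -- (empty dictionary), excluded by Pre_
  PySem.List.pyGetD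
    (PySem.Dict.ofList (PySem.List.slice
        (PySem.List.sorted word_score.items (fun kv => kv.2) true) none (some 1))).keys
    0 ""

-- ===== PORT B =====
def bestWord_alt (dictionary : List String) (word_length : Int) : String :=
  let freq : PySem.Dict Char Int :=
    dictionary.foldl (fun fd word =>
      word.toList.foldl (fun fd ch => fd.insert ch (fd.getD ch 0 + 1)) fd) PySem.Dict.empty
  let ranked : List Char :=
    (PySem.List.slice (PySem.List.sorted freq.items (fun kv => kv.2) true)
        none (some word_length)).map (fun kv => kv.1)
  let weight : PySem.Dict Char Int :=
    (PySem.List.enumerate ranked 0).foldl (fun d p => d.insert p.2 (word_length - p.1)) PySem.Dict.empty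
  let word_score : PySem.Dict String Int :=
    dictionary.foldl (fun ws word =>
      ws.insert word (((PySem.Set.ofList word.toList).map (fun ch => weight.getD ch 0)).sum))
      PySem.Dict.empty
  -- `sorted(...)[0][0]`: the default stands where Python raises IndexError (empty dictionary), excluded by Pre_
  (PySem.List.pyGetD (PySem.List.sorted word_score.items (fun kv => kv.2) true) 0 ("", 0)).1

-- ===== PRECONDITION & SPEC =====
-- Pre_ excludes only the empty dictionary, on which both Pythons raise IndexError.
def Pre_bestWord (dictionary : List String) (word_length : Int) : Prop := dictionary ≠ []
instance (dictionary : List String) (word_length : Int) : Decidable (Pre_bestWord dictionary word_length) := by unfold Pre_bestWord; infer_instance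
def pvWitness_bestWord : List String × Int := (["hello", "world"], 5)

def Spec_bestWord (dictionary : List String) (word_length : Int) (out : String) : Prop := out = bestWord_alt dictionary word_length
instance (dictionary : List String) (word_length : Int) (out : String) : Decidable (Spec_bestWord dictionary word_length out) := by unfold Spec_bestWord; infer_instance

-- ===== CLAIM (what is proved, stated in full; the proofs are below) =====
def Claim_equal_bestWord : Prop := ∀ (dictionary : List String) (word_length : Int), Dom_bestWord dictionary word_length → Pre_bestWord dictionary word_length → Spec_bestWord dictionary word_length (bestWord dictionary word_length)

-- ===== LEMMAS AND PROOFS =====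
set_option maxHeartbeats 1000000

-- A's helper is exactly the "increment with default 0" dictionary update B's counting loop uses.
theorem letterDictionary_eq :
    letterDictionary = fun d c => d.insert c (d.getD c 0 + 1) := by
  funext d c
  unfold letterDictionary
  cases h : d.get? c <;> simp [PySem.Dict.getD_eq_get?_getD, h]

-- keys of dict(pairs) when the pair keys are distinct
theorem keys_ofList_of_nodup {κ ν : Type} [BEq κ] [LawfulBEq κ] (l : List (κ × ν))
    (h : (l.map Prod.fst).Nodup) : (PySem.Dict.ofList l).keys = l.map Prod.fst := by
  show (l.foldl (fun d p => d.insert p.1 p.2) PySem.Dict.empty).keys = l.map Prod.fst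
  have := PySem.Dict.items_foldl_insert_fresh (k := Prod.fst) (v := Prod.snd)
    (d := PySem.Dict.empty) (l := l) (by simp [PySem.Dict.contains_empty]) h
  simp only [PySem.Dict.keys]
  rw [this]
  show (([] : List (κ × ν)) ++ l.map (fun a => (a.1, a.2))).map Prod.fst = _
  simp

-- xs[:b] is a sublist of xs
theorem slice_to_sublist {α : Type} (xs : List α) (b : Int) :
    (PySem.List.slice xs none (some b)).Sublist xs := by
  have h : PySem.List.slice xs none (some b) = xs.take (PySem.List.clampIdx xs.length b) := rfl
  rw [h]; exact List.take_sublist _ _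

-- sum of an if-then-else over a Nodup list (g vanishing at the distinguished key)
theorem sum_map_ite_key (S : List Char) (k : Char) (v : Int) (g : Char → Int)
    (hS : S.Nodup) (hk : g k = 0) :
    (S.map (fun c => if k == c then v else g c)).sum
      = (if k ∈ S then v else 0) + (S.map g).sum := by
  induction S with
  | nil => simp
  | cons s t ih =>
    rcases List.nodup_cons.mp hS with ⟨hs, ht⟩
    by_cases hks : k = s
    · subst hks
      simp only [List.map_cons, List.sum_cons, beq_self_eq_true, if_pos, List.mem_cons, true_or]
      have he : (t.map (fun c => if k == c then v else g c)).sum = (t.map g).sum := by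
        apply congrArg
        apply List.map_congr_left
        intro x hx
        have : k ≠ x := fun he => hs (he ▸ hx)
        simp [beq_iff_eq, this]
      rw [he, hk]; ring
    · have hbk : (k == s) = false := by simp [hks]
      simp only [List.map_cons, List.sum_cons, hbk, Bool.false_eq_true, List.mem_cons]
      rw [ih ht]
      simp [hks]
      ring

-- summing table lookups over a Nodup list = summing the table entries whose key is in the list
theorem sum_getD_eq_sum_filter (l : List (Char × Int)) (S : List Char)
    (hS : S.Nodup) (hl : (l.map Prod.fst).Nodup) :
    (S.map (fun c => (PySem.Dict.mk l).getD c 0)).sum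
      = ((l.filter (fun p => decide (p.1 ∈ S))).map (fun p => p.2)).sum := by
  induction l with
  | nil =>
    have h0 : ∀ c : Char, (PySem.Dict.mk ([] : List (Char × Int))).getD c 0 = 0 := by
      intro c; rfl
    simp [h0]
  | cons p t ih =>
    obtain ⟨k, v⟩ := p
    have hkt : k ∉ t.map Prod.fst := by
      simpa using (List.nodup_cons.mp hl).1
    have hgk : (PySem.Dict.mk t).getD k 0 = 0 := by
      rw [PySem.Dict.getD_eq_get?_getD]
      have hn : (PySem.Dict.mk t).get? k = none := by
        rw [PySem.Dict.get?_eq_none_iff_not_mem_keys]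
        simpa [PySem.Dict.keys_mk] using hkt
      simp [hn]
    have hstep : ∀ c : Char, (PySem.Dict.mk ((k, v) :: t)).getD c 0
        = if k == c then v else (PySem.Dict.mk t).getD c 0 := by
      intro c
      rw [PySem.Dict.getD_eq_get?_getD, PySem.Dict.get?_mk_cons]
      by_cases h : k == c <;> simp [h, PySem.Dict.getD_eq_get?_getD]
    simp only [hstep]
    rw [sum_map_ite_key S k v _ hS hgk, ih (List.nodup_cons.mp hl).2]
    by_cases hkS : k ∈ S <;> simp [hkS]

-- `best_letters[i] in word` on a 1-character string is membership of that character
theorem isIn_singleton_eq (c : Char) (w : List Char) :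
    PySem.Chars.isIn [c] w = decide (c ∈ PySem.Set.ofList w) := by
  rw [Bool.eq_iff_iff]
  simp [PySem.Chars.isIn_iff_infix, List.singleton_infix_iff, PySem.Set.mem_ofList]

-- the two per-word scores agree for any Nodup ranked-letter list
theorem score_eq (bl : List Char) (w : List Char) (wl : Int) (hbl : bl.Nodup) :
    (PySem.List.pyRange 0 (bl.length : Int) 1).foldl (fun s i =>
        if PySem.Chars.isIn [PySem.List.pyGetD bl i ' '] w then s + (wl - i) else s) 0
      = ((PySem.Set.ofList w).map (fun ch =>
          ((PySem.List.enumerate bl 0).foldl (fun d p => d.insert p.2 (wl - p.1))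
            PySem.Dict.empty).getD ch 0)).sum := by
  have hitems : ((PySem.List.enumerate bl 0).foldl (fun d p => d.insert p.2 (wl - p.1))
      PySem.Dict.empty).items = (PySem.List.enumerate bl 0).map (fun p => (p.2, wl - p.1)) := by
    have := PySem.Dict.items_foldl_insert_fresh (k := fun p : Int × Char => p.2)
      (v := fun p : Int × Char => wl - p.1) (d := PySem.Dict.empty)
      (l := PySem.List.enumerate bl 0) (by simp [PySem.Dict.contains_empty])
      (by rw [PySem.List.map_snd_enumerate]; exact hbl)
    simpa using this
  have hmk : ((PySem.List.enumerate bl 0).foldl (fun d p => d.insert p.2 (wl - p.1))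
      PySem.Dict.empty) = PySem.Dict.mk ((PySem.List.enumerate bl 0).map (fun p => (p.2, wl - p.1))) := by
    apply PySem.Dict.ext
    rw [hitems]
  rw [hmk, sum_getD_eq_sum_filter _ _ (PySem.Set.nodup_ofList w)
    (by simp only [List.map_map]
        have hc : ((fun p : Char × Int => p.1) ∘ (fun p : Int × Char => (p.2, wl - p.1))) = (fun p : Int × Char => p.2) := rfl
        rw [hc, PySem.List.map_snd_enumerate]; exact hbl)]
  have henum : PySem.List.enumerate bl 0 = (PySem.List.pyRange 0 (bl.length : Int) 1).map
      (fun j => (j, PySem.List.pyGetD bl j ' ')) := by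
    simpa using PySem.List.enumerate_eq_map_pyRange (xs := bl) (d := ' ')
  rw [List.filter_map, List.map_map]
  have hL : (PySem.List.pyRange 0 (bl.length : Int) 1).foldl (fun s i =>
        if PySem.Chars.isIn [PySem.List.pyGetD bl i ' '] w then s + (wl - i) else s) 0
      = ((PySem.List.pyRange 0 (bl.length : Int) 1).map
          (fun j => (j, PySem.List.pyGetD bl j ' '))).foldl
        (fun s p => if PySem.Chars.isIn [p.2] w then s + (wl - p.1) else s) 0 := by
    rw [List.foldl_map]
  rw [hL, ← henum]
  rw [PySem.List.foldl_if_eq_foldl_filter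
    (p := fun p : Int × Char => PySem.Chars.isIn [p.2] w)
    (f := fun s (p : Int × Char) => s + (wl - p.1))]
  rw [PySem.List.foldl_add (g := fun p : Int × Char => wl - p.1)]
  rw [henum]
  simp only [zero_add]
  congr 1
  apply congrArg
  apply List.filter_congr
  intro p _
  exact isIn_singleton_eq p.2 w

-- final pick: list(dict(sorted(...)[:1]).keys())[0] = sorted(...)[0][0]
theorem final_pick_eq (l : List (String × Int)) :
    PySem.List.pyGetD (PySem.Dict.ofList (PySem.List.slice l none (some 1))).keys 0 ""
      = (PySem.List.pyGetD l 0 ("", 0)).1 := by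
  cases l with
  | nil => rfl
  | cons p t =>
    have h1 : PySem.List.slice (p :: t) none (some 1) = [p] := by
      rw [PySem.List.slice_to _ (by omega : (0:Int) ≤ 1)]; rfl
    rw [h1]
    obtain ⟨k, v⟩ := p
    have h2 : (PySem.Dict.ofList [(k, v)]).keys = [k] := by
      have := keys_ofList_of_nodup [(k, v)] (by simp)
      simpa using this
    rw [h2]
    simp [PySem.List.pyGetD, PySem.List.pyGet?, PySem.List.pyIdx?]

theorem bestWord_eq_alt (dictionary : List String) (word_length : Int) :
    bestWord dictionary word_length = bestWord_alt dictionary word_length := by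
  unfold bestWord bestWord_alt
  rw [letterDictionary_eq]
  dsimp only
  set F : PySem.Dict Char Int := dictionary.foldl (fun fd word =>
      word.toList.foldl (fun d c => d.insert c (d.getD c 0 + 1)) fd) PySem.Dict.empty with hF
  have hFcounter : F = PySem.Dict.counter (dictionary.flatMap String.toList) := by
    rw [hF, ← List.foldl_flatMap]
    rfl
  have hnodup : (((PySem.List.slice (PySem.List.sorted F.items (fun kv => kv.2) true)
      none (some word_length))).map (fun kv => kv.1)).Nodup := by
    have h1 : (F.items.map (fun kv : Char × Int => kv.1)).Nodup := by
      rw [hFcounter, PySem.Dict.items_counter]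
      simp only [List.map_map]
      have hid : ((fun kv : Char × Int => kv.1) ∘ fun k =>
          (k, ((dictionary.flatMap String.toList).count k : Int))) = id := rfl
      rw [hid, List.map_id]
      exact PySem.Set.nodup_ofList _
    have h2 := (h1.perm ((PySem.List.sorted_perm F.items (fun kv => kv.2) true).map
      (fun kv : Char × Int => kv.1)).symm)
    exact h2.sublist ((slice_to_sublist _ word_length).map _)
  rw [keys_ofList_of_nodup _ hnodup]
  set bl : List Char := (PySem.List.slice (PySem.List.sorted F.items (fun kv => kv.2) true)
      none (some word_length)).map (fun kv => kv.1) with hbl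
  have hfun : (fun (ws : PySem.Dict String Int) (word : String) =>
        ws.insert word ((PySem.List.pyRange 0 (bl.length : Int) 1).foldl (fun s i =>
          if PySem.Chars.isIn [PySem.List.pyGetD bl i ' '] word.toList then
            s + (word_length - i) else s) 0))
      = (fun (ws : PySem.Dict String Int) (word : String) =>
        ws.insert word (((PySem.Set.ofList word.toList).map (fun ch =>
          ((PySem.List.enumerate bl 0).foldl (fun d p => d.insert p.2 (word_length - p.1))
            PySem.Dict.empty).getD ch 0)).sum)) := by
    funext ws word
    rw [score_eq bl word.toList word_length hnodup]
  rw [hfun]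
  exact final_pick_eq _

-- ===== VERDICT (by name: the statement is the Claim_ definition above) =====
theorem bestWord_spec : Claim_equal_bestWord := by
  intro dictionary word_length _ _
  unfold Spec_bestWord
  exact bestWord_eq_alt dictionary word_length
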